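-- pv_equiv track=rewrite | github.com/emdb-empiar/3dstrudel | threed_strudel/utils/functions.py | split_sorted_list
-- ===== SOURCE A (Python) =====
-- def split_sorted_list(inp_list, nr):
--     new_list = []
--
--     for i in range(nr):
--         tmp = []
--         for k in range(i, len(inp_list), nr):
--             try:
--                 tmp.append(inp_list[k])
--             except IndexError:
--                 pass
--         new_list.append(tmp)
--     return new_list
-- ===== SOURCE B (Python) =====
-- def split_sorted_list(inp_list, nr):
--     if nr <= 0:
--         return []
--     buckets = [[] for _ in range(nr)]
--     for idx, x in enumerate(inp_list):
--         buckets[idx % nr].append(x)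
--     return buckets
-- ===== Notes on version B (the rewrite author's own statement) =====
-- stated objective: simpler
-- what changed: Replaces nr passes over strided index ranges (with a dead try/except) by one forward pass that distributes each element into buckets[idx % nr].
import Mathlib
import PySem

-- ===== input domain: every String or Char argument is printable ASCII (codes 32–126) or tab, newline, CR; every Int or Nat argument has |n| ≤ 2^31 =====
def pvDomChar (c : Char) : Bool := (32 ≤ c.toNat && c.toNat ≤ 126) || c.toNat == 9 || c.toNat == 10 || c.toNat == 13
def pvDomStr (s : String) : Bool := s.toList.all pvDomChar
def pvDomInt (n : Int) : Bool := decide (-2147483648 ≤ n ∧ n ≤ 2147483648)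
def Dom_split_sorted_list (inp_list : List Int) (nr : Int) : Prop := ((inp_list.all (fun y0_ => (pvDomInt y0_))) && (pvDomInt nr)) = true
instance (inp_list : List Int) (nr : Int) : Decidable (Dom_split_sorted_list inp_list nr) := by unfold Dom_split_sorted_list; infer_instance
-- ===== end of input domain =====

-- B replaces A's nr strided passes (with a dead try/except) by one forward pass
-- distributing each element into buckets[idx % nr]; same result, plainer code.

-- ===== PORT A =====
def split_sorted_list (inp_list : List Int) (nr : Int) : List (List Int) :=
  (PySem.List.pyRange 0 nr 1).foldl (fun new_list i =>
    let tmp := (PySem.List.pyRange i (inp_list.length : Int) nr).foldl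
      (fun tmp k =>
        match PySem.List.pyGet? inp_list k with
        | some v => tmp ++ [v]      -- tmp.append(inp_list[k])
        | none => tmp)              -- except IndexError: pass (never reached)
      ([] : List Int)
    new_list ++ [tmp]) []

-- ===== PORT B =====
def split_sorted_list_alt (inp_list : List Int) (nr : Int) : List (List Int) :=
  if nr ≤ 0 then []
  else
    let buckets := (PySem.List.pyRange 0 nr 1).map (fun _ => ([] : List Int))
    (PySem.List.enumerate inp_list 0).foldl
      (fun bs p => bs.modify (PySem.Int.mod p.1 nr).toNat (fun b => b ++ [p.2])) buckets

-- ===== PRECONDITION & SPEC =====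
def Spec_split_sorted_list (inp_list : List Int) (nr : Int) (out : List (List Int)) : Prop := out = split_sorted_list_alt inp_list nr
instance (inp_list : List Int) (nr : Int) (out : List (List Int)) : Decidable (Spec_split_sorted_list inp_list nr out) := by unfold Spec_split_sorted_list; infer_instance

-- ===== CLAIM (what is proved, stated in full; the proofs are below) =====
def Claim_equal_split_sorted_list : Prop := ∀ (inp_list : List Int) (nr : Int), Dom_split_sorted_list inp_list nr → Spec_split_sorted_list inp_list nr (split_sorted_list inp_list nr)

-- ===== LEMMAS AND PROOFS =====

-- the elements of l whose position, counting from s, is ≡ j (mod n)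
def pickFrom (l : List Int) (s j n : Int) : List Int :=
  match l with
  | [] => []
  | x :: xs => if PySem.Int.mod s n = j then x :: pickFrom xs (s+1) j n else pickFrom xs (s+1) j n

-- cons form of a positive-step range
lemma pyRange_cons_of_pos (a b n : Int) (hn : 0 < n) (h : a < b) :
    PySem.List.pyRange a b n = a :: PySem.List.pyRange (a+n) b n := by
  rw [PySem.List.pyRange_of_pos a b hn, PySem.List.pyRange_of_pos (a+n) b hn]
  have key : (b - a + n - 1) / n = (b - (a+n) + n - 1) / n + 1 := by
    have e : b - a + n - 1 = (b - (a+n) + n - 1) + 1 * n := by ring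
    rw [e, Int.add_mul_ediv_right _ _ (by omega)]
  by_cases h2 : a + n < b
  · rw [if_pos h, if_pos h2]
    have hpos : 0 ≤ (b - (a+n) + n - 1) / n := Int.ediv_nonneg (by omega) (by omega)
    have e2 : ((b - a + n - 1) / n).toNat = ((b - (a+n) + n - 1) / n).toNat + 1 := by omega
    rw [e2, List.range_succ_eq_map, List.map_cons, List.map_map]
    refine congrArg₂ _ (by ring) (List.map_congr_left ?_)
    intro k _
    simp [Function.comp]
    ring
  · rw [if_pos h, if_neg h2]
    have h3 : (b - (a+n) + n - 1) / n = 0 := by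
      apply Int.ediv_eq_zero_of_lt <;> omega
    have e2 : ((b - a + n - 1) / n).toNat = 1 := by omega
    rw [e2]
    simp

lemma pyRange_nil_of_pos (a b n : Int) (hn : 0 < n) (h : b ≤ a) :
    PySem.List.pyRange a b n = [] := by
  rw [PySem.List.pyRange_of_pos a b hn, if_neg (by omega)]
  simp

lemma pyGetD_cons_of_pos (x : Int) (xs : List Int) (m : Int) (h1 : 1 ≤ m)
    (h2 : m < (xs.length : Int) + 1) :
    PySem.List.pyGetD (x::xs) m 0 = PySem.List.pyGetD xs (m-1) 0 := by
  rw [PySem.List.pyGetD_eq_getElem (x::xs) 0 (by omega) (by simp; omega),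
      PySem.List.pyGetD_eq_getElem xs 0 (by omega) (by simp; omega)]
  have e : m.toNat = (m-1).toNat + 1 := by omega
  simp only [e, List.getElem_cons_succ]

-- B's distributing loop: bucket j collects the elements at positions ≡ j (mod n)
lemma distrib (n : Int) (hn : 0 < n) (l : List Int) : ∀ (s : Int) (bs : List (List Int)),
    bs.length = n.toNat →
    (PySem.List.enumerate l s).foldl
      (fun bs p => bs.modify (PySem.Int.mod p.1 n).toNat (fun b => b ++ [p.2])) bs
    = (List.range n.toNat).map (fun j => bs.getD j [] ++ pickFrom l s (j : Int) n) := by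
  induction l with
  | nil =>
    intro s bs hlen
    simp [PySem.List.enumerate, pickFrom]
    apply List.ext_getElem
    · simp [hlen]
    · intro i h1 h2
      simp at h2
      simp [List.getElem?_eq_getElem h1]
  | cons x xs ih =>
    intro s bs hlen
    rw [PySem.List.enumerate_cons, List.foldl_cons]
    rw [ih (s+1) _ (by simp [hlen])]
    apply List.map_congr_left
    intro j hj
    simp only [List.mem_range] at hj
    have hmnn : 0 ≤ PySem.Int.mod s n := PySem.Int.mod_nonneg s hn
    have hmlt : PySem.Int.mod s n < n := PySem.Int.mod_lt s hn
    have hjlen : j < bs.length := by omega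
    rw [List.getD_eq_getElem _ [] (by simp [hlen] ; omega :
          j < (bs.modify (PySem.Int.mod (s, x).1 n).toNat (fun b => b ++ [(s, x).2])).length),
        List.getD_eq_getElem bs [] hjlen, List.getElem_modify]
    show _ = bs[j] ++ pickFrom (x :: xs) s (j:Int) n
    rw [pickFrom]
    by_cases hc : PySem.Int.mod s n = (j : Int)
    · have ht : (PySem.Int.mod (s,x).1 n).toNat = j := by simp; omega
      rw [if_pos ht, if_pos hc]
      simp
    · have ht : ¬ (PySem.Int.mod (s,x).1 n).toNat = j := by simp; omega
      rw [if_neg ht, if_neg hc]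

-- pickFrom as a strided-range gather
lemma pick_closed (n j : Int) (hn : 0 < n) (hj0 : 0 ≤ j) (hjn : j < n) (l : List Int) :
    ∀ (s : Int), 0 ≤ s →
    pickFrom l s j n
    = (PySem.List.pyRange (s + PySem.Int.mod (j - s) n) (s + (l.length : Int)) n).map
        (fun k => PySem.List.pyGetD l (k - s) 0) := by
  have hjj : j % n = j := Int.emod_eq_of_lt hj0 hjn
  induction l with
  | nil =>
    intro s hs
    rw [pickFrom, pyRange_nil_of_pos _ _ _ hn (by
      have := PySem.Int.mod_nonneg (j - s) hn
      simp; omega)]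
    simp
  | cons x xs ih =>
    intro s hs
    have hlen : ((x::xs).length : Int) = (xs.length : Int) + 1 := by simp
    rw [pickFrom]
    rw [PySem.Int.mod_eq_emod_of_pos (a := j - s) hn]
    by_cases hc : PySem.Int.mod s n = j
    · rw [if_pos hc]
      have hdvd : (j - s) % n = 0 := by
        rw [Int.sub_emod, hjj, ← PySem.Int.mod_eq_emod_of_pos (a := s) hn, hc]
        simp
      rw [hdvd]
      have hcons := pyRange_cons_of_pos s (s + ((x::xs).length : Int)) n hn (by simp)
      rw [show s + 0 = s by ring, hcons, List.map_cons]
      rw [show s - s = 0 from by ring]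
      have hx : PySem.List.pyGetD (x::xs) 0 0 = x := PySem.List.pyGetD_zero_cons x xs 0
      rw [hx]
      congr 1
      rw [ih (s+1) (by omega)]
      have hstart : (s+1) + PySem.Int.mod (j - (s+1)) n = s + n := by
        rw [PySem.Int.mod_eq_emod_of_pos (a := j - (s+1)) hn]
        obtain ⟨m, hm⟩ := Int.dvd_of_emod_eq_zero hdvd
        have e : j - (s+1) = (n-1) + (m-1) * n := by linear_combination hm
        have : (j - (s+1)) % n = n - 1 := by
          rw [e, Int.add_mul_emod_self_right, Int.emod_eq_of_lt (by omega) (by omega)]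
        omega
      rw [hstart]
      have hend : (s+1) + ((xs.length : Int)) = s + ((x::xs).length : Int) := by simp; ring
      rw [hend]
      apply List.map_congr_left
      intro k hk
      rw [PySem.List.mem_pyRange_iff_of_pos hn] at hk
      rw [show k - s = (k - (s+1)) + 1 from by ring]
      rw [pyGetD_cons_of_pos x xs _ (by omega) (by simp at hk ⊢; omega)]
      congr 1
      ring
    · rw [if_neg hc]
      have hr0 : 0 ≤ (j - s) % n := Int.emod_nonneg _ (by omega)
      have hrlt : (j - s) % n < n := Int.emod_lt_of_pos _ hn
      have hrne : (j - s) % n ≠ 0 := by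
        intro h0
        apply hc
        rw [PySem.Int.mod_eq_emod_of_pos (a := s) hn]
        rw [show s = j - (j - s) from by ring, Int.sub_emod, h0, hjj]
        simpa using hjj
      rw [ih (s+1) (by omega)]
      have hshift : (j - (s+1)) % n = (j - s) % n - 1 := by
        have h1n : (1:Int) % n = 1 := Int.emod_eq_of_lt (by omega) (by omega)
        rw [show j - (s+1) = (j - s) - 1 from by ring, Int.sub_emod, h1n]
        exact Int.emod_eq_of_lt (by omega) (by omega)
      have hstart : (s+1) + PySem.Int.mod (j - (s+1)) n = s + (j - s) % n := by
        rw [PySem.Int.mod_eq_emod_of_pos (a := j - (s+1)) hn, hshift]; ring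
      rw [hstart]
      have hend : (s+1) + ((xs.length : Int)) = s + ((x::xs).length : Int) := by simp; ring
      rw [hend]
      apply List.map_congr_left
      intro k hk
      rw [PySem.List.mem_pyRange_iff_of_pos hn] at hk
      rw [show k - s = (k - (s+1)) + 1 from by ring]
      rw [pyGetD_cons_of_pos x xs _ (by omega) (by simp at hk ⊢; omega)]
      congr 1
      ring

-- A's inner strided loop, with the dead try/except removed
lemma inner_eq_map (l : List Int) (i n : Int) (hi : 0 ≤ i) (hn : 0 < n) :
    (PySem.List.pyRange i (l.length : Int) n).foldl
      (fun tmp k =>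
        match PySem.List.pyGet? l k with
        | some v => tmp ++ [v]
        | none => tmp) ([] : List Int)
    = (PySem.List.pyRange i (l.length : Int) n).map (fun k => PySem.List.pyGetD l k 0) := by
  rw [PySem.List.foldl_congr_mem _ _ (fun tmp k => tmp ++ [PySem.List.pyGetD l k 0]) _ ?_]
  · rw [PySem.List.foldl_append_singleton_eq_map]
    simp
  · intro acc k hk
    rw [PySem.List.mem_pyRange_iff_of_pos hn] at hk
    rw [PySem.List.pyGet?_eq_some_getElem l (by omega) (by omega)]
    show acc ++ [l[k.toNat]'(by omega)] = acc ++ [PySem.List.pyGetD l k 0]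
    rw [PySem.List.pyGetD_eq_getElem l 0 (by omega) (by omega)]

-- ===== VERDICT (by name: the statement is the Claim_ definition above) =====
theorem split_sorted_list_spec : Claim_equal_split_sorted_list := by
  intro inp_list nr _dom
  unfold Spec_split_sorted_list split_sorted_list split_sorted_list_alt
  by_cases hnr : nr ≤ 0
  · rw [if_pos hnr, PySem.List.pyRange_one_eq_nil hnr]
    rfl
  · rw [if_neg hnr]
    have hn : 0 < nr := by omega
    have hblen : ((PySem.List.pyRange 0 nr 1).map (fun _ => ([] : List Int))).length = nr.toNat := by
      simp [PySem.List.length_pyRange_one]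
    rw [distrib nr hn inp_list 0 _ hblen]
    show (PySem.List.pyRange 0 nr 1).foldl (fun acc i => acc ++
      [(PySem.List.pyRange i (inp_list.length : Int) nr).foldl
        (fun tmp k =>
          match PySem.List.pyGet? inp_list k with
          | some v => tmp ++ [v]
          | none => tmp) ([] : List Int)]) [] = _
    rw [PySem.List.foldl_append_singleton_eq_map, List.nil_append]
    rw [PySem.List.pyRange_one 0 nr]
    simp only [sub_zero, List.map_map]
    apply List.map_congr_left
    intro j hj
    simp only [List.mem_range] at hj
    have hjnr : (j : Int) < nr := by omega
    simp only [Function.comp]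
    rw [show (0:Int) + (j:Int) = (j:Int) from by ring]
    rw [inner_eq_map inp_list j nr (by omega) hn]
    rw [pick_closed nr j hn (by omega) hjnr inp_list 0 (le_refl 0)]
    have hmod : PySem.Int.mod ((j:Int) - 0) nr = (j:Int) := by
      rw [PySem.Int.mod_eq_emod_of_pos hn]
      simpa using Int.emod_eq_of_lt (by omega) hjnr
    have hbd : ∀ (l : List Nat) (j : Nat), (List.map ((fun _ => ([] : List Int)) ∘ fun (k : Nat) => 0 + (k : Int)) l).getD j ([] : List Int) = [] := by
      intro l
      induction l with
      | nil => intro j; rfl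
      | cons a t ih =>
        intro j
        cases j with
        | zero => rfl
        | succ m => exact ih m
    rw [hbd (List.range nr.toNat) j, List.nil_append, hmod]
    simp
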